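-- pv_equiv track=rewrite | github.com/camcast3/interviewprep2026 | codesignal/repeat_char_jump.py | repeat_char_jump
-- ===== SOURCE A (Python) =====
-- def repeat_char_jump(inputString, k):
--     # TODO: Implement the solution to generate n-length string as per given instructions.
--     result = ''
--     length = len(inputString)
--     visited = [False] * length
--     i = 0
--
--     while not visited[i]:
--
--         result += inputString[i]
--         visited[i] = True
--
--         i = (i + k) % length
--
--     return result
-- ===== SOURCE B (Python) =====
-- def repeat_char_jump(inputString, k):
--     # Closed form: the walk from 0 by steps of k mod length is a pure cycle that
--     # first repeats at index 0 after length // gcd(length, k) steps.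
--     length = len(inputString)
--     g = length
--     r = k % length
--     while r:
--         g, r = r, g % r
--     m = length // g
--     return ''.join(inputString[(j * k) % length] for j in range(m))
-- ===== Notes on version B (the rewrite author's own statement) =====
-- stated objective: faster
-- what changed: Replaces the visited-table cycle walk with a closed form: the orbit of 0 under i->(i+k)%length first repeats at 0 after length//gcd(length,k) steps, so B computes the gcd by Euclid and joins the m = length//gcd characters directly, with no visited bookkeeping and no repeated string concatenation.
import Mathlib
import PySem

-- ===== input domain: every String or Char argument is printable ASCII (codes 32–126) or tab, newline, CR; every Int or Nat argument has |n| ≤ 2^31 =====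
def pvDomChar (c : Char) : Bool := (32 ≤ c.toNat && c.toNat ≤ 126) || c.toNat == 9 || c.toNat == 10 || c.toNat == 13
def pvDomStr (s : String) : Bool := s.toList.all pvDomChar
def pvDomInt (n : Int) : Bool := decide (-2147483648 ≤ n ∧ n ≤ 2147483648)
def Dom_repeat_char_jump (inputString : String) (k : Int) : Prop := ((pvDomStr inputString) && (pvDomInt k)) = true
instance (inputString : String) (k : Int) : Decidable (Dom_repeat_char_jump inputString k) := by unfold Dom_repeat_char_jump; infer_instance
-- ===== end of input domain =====

-- B replaces A's visited-table cycle walk by the closed form length // gcd(length, k):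
-- the orbit of 0 under i -> (i+k) % length first repeats at index 0 after that many steps.

-- ===== PORT A =====
-- the while-loop of A; fuel length+1 always suffices, since each iteration marks a
-- previously-unmarked cell of `visited` (proved below), so the loop runs ≤ length times.
def pvLoopA (cs : List Char) (k length : Int) :
    Nat → List Bool → Int → List Char → List Char
  | 0, _, _, result => result                      -- fuel exhausted: unreachable (see invariant proof)
  | fuel+1, visited, i, result =>
    match PySem.List.pyGet? visited i with
    | some false =>
      match PySem.List.pyGet? cs i with
      | some c => pvLoopA cs k length fuel (PySem.List.pySetD visited i true)
                    (PySem.Int.mod (i + k) length) (result ++ [c])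
      | none => result                             -- IndexError: unreachable, |visited| = |cs|
    | _ => result                                  -- visited[i] is True (loop exit), or IndexError on "" (excluded by Pre_)

def repeat_char_jump (inputString : String) (k : Int) : String :=
  let cs := inputString.toList
  let length : Int := PySem.Str.len inputString
  let visited := List.replicate cs.length false
  String.ofList (pvLoopA cs k length (cs.length + 1) visited 0 [])

-- ===== PORT B =====
-- Source B's hand-written Euclid loop: while r: g, r = r, g % r
def pvGcdLoop (g r : Int) : Int :=
  if h : r ≠ 0 then pvGcdLoop r (PySem.Int.mod g r) else g
termination_by r.natAbs
decreasing_by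
  rcases lt_or_gt_of_ne h with hneg | hpos
  · have h1 := PySem.Int.mod_neg_bounds (a := g) hneg
    omega
  · have h1 := PySem.Int.mod_nonneg (a := g) hpos
    have h2 := PySem.Int.mod_lt (a := g) hpos
    omega

def repeat_char_jump_alt (inputString : String) (k : Int) : String :=
  let cs := inputString.toList
  let length : Int := PySem.Str.len inputString
  let g := pvGcdLoop length (PySem.Int.mod k length)
  let m := PySem.Int.floordiv length g
  String.ofList ((PySem.List.pyRange 0 m 1).map
    (fun j => PySem.List.pyGetD cs (PySem.Int.mod (j * k) length) ' '))

-- ===== PRECONDITION & SPEC =====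
-- On the empty string A raises IndexError (visited[0]) and B raises ZeroDivisionError (k % 0).
def Pre_repeat_char_jump (inputString : String) (k : Int) : Prop := inputString.toList ≠ []
instance (inputString : String) (k : Int) : Decidable (Pre_repeat_char_jump inputString k) := by
  unfold Pre_repeat_char_jump; infer_instance
def pvWitness_repeat_char_jump : String × Int := ("abcdef", 4)

def Spec_repeat_char_jump (inputString : String) (k : Int) (out : String) : Prop := out = repeat_char_jump_alt inputString k
instance (inputString : String) (k : Int) (out : String) : Decidable (Spec_repeat_char_jump inputString k out) := by unfold Spec_repeat_char_jump; infer_instance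

-- ===== CLAIM (what is proved, stated in full; the proofs are below) =====
def Claim_equal_repeat_char_jump : Prop := ∀ (inputString : String) (k : Int), Dom_repeat_char_jump inputString k → Pre_repeat_char_jump inputString k → Spec_repeat_char_jump inputString k (repeat_char_jump inputString k)

-- ===== LEMMAS AND PROOFS =====

-- proof-only abbreviations for the index orbit and A's visited table
def pvIdx (R L t : Nat) : Nat := (t * R) % L
def pvVis (R L t : Nat) : List Bool :=
  (List.range L).map (fun p => (List.range t).any (fun j => pvIdx R L j == p))

-- Source B's Euclid loop computes the gcd
theorem pvGcdLoop_eq (b a : Nat) : pvGcdLoop (a : Int) (b : Int) = (Nat.gcd b a : Int) := by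
  induction b using Nat.strong_induction_on generalizing a with
  | _ b ih =>
    rw [pvGcdLoop]
    by_cases hb : b = 0
    · simp [hb]
    · have hb' : (b : Int) ≠ 0 := by exact_mod_cast hb
      rw [dif_pos hb', PySem.Int.mod_natCast, ih (a % b) (Nat.mod_lt _ (Nat.pos_of_ne_zero hb)) b,
        Nat.gcd_rec b a]

-- divisibility characterisation of the orbit's period
theorem pv_dvd_iff (R L n : Nat) (hL : 0 < L) :
    L ∣ n * R ↔ (L / Nat.gcd R L) ∣ n := by
  set g := Nat.gcd R L with hg
  have hgpos : 0 < g := Nat.gcd_pos_of_pos_right R hL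
  have hgL : g ∣ L := Nat.gcd_dvd_right R L
  have hgR : g ∣ R := Nat.gcd_dvd_left R L
  have hLc : L = g * (L / g) := (Nat.mul_div_cancel' hgL).symm
  have hcop : Nat.Coprime (L / g) (R / g) := (Nat.coprime_div_gcd_div_gcd hgpos).symm
  have key : ∀ c : Nat, c * R = g * (c * (R / g)) := by
    intro c
    calc c * R = c * (g * (R / g)) := by rw [Nat.mul_div_cancel' hgR]
    _ = g * (c * (R / g)) := by ring
  constructor
  · intro h
    have h' : g * (L / g) ∣ g * (n * (R / g)) := by rw [← key, ← hLc]; exact h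
    have hdvd : (L / g) ∣ n * (R / g) := (Nat.mul_dvd_mul_iff_left hgpos).mp h'
    exact hcop.dvd_of_dvd_mul_right hdvd
  · rintro ⟨c, hc⟩
    refine ⟨c * (R / g), ?_⟩
    calc n * R = g * (n * (R / g)) := key n
    _ = g * (L / g * c * (R / g)) := by rw [hc]
    _ = g * (L / g) * (c * (R / g)) := by ring
    _ = L * (c * (R / g)) := by rw [← hLc]

-- pointwise facts about the visited table and the orbit
theorem pvVis_get (R L t p : Nat) (hp : p < L) :
    (pvVis R L t)[p]? = some ((List.range t).any fun j => pvIdx R L j == p) := by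
  simp [pvVis, hp]

theorem pvIdx_lt (R L t : Nat) (hL : 0 < L) : pvIdx R L t < L := Nat.mod_lt _ hL

theorem pvIdx_zero (R L : Nat) : pvIdx R L 0 = 0 := by simp [pvIdx]

-- the visited table after marking index pvIdx t is the table of step t+1
theorem pvVis_set (R L t : Nat) (hL : 0 < L) :
    PySem.List.pySetD (pvVis R L t) ((pvIdx R L t : Nat) : Int) true = pvVis R L (t + 1) := by
  rw [PySem.List.pySetD_natCast]
  apply List.ext_getElem
  · simp [pvVis]
  · intro p h1 h2
    have hp : p < L := by simpa [pvVis] using h2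
    rw [List.getElem_set]
    by_cases hpt : pvIdx R L t = p
    · simp [pvVis, hpt, List.range_succ]
    · simp [pvVis, hpt, List.range_succ]

-- one jump: (pvIdx t + k) % L = pvIdx (t+1)
theorem pvStep (k : Int) (L R t : Nat) (hL : 0 < L) (hR : R < L)
    (hk : PySem.Int.mod k (L : Int) = (R : Int)) :
    PySem.Int.mod (((pvIdx R L t : Nat) : Int) + k) (L : Int) = ((pvIdx R L (t + 1) : Nat) : Int) := by
  have hL' : (0 : Int) < L := by exact_mod_cast hL
  have hkk : k % (L : Int) = (R : Int) := by rw [← PySem.Int.mod_eq_emod_of_pos hL']; exact hk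
  have h1 : ((pvIdx R L t : Nat) : Int) % (L : Int) = ((pvIdx R L t : Nat) : Int) :=
    Int.emod_eq_of_lt (by positivity) (by exact_mod_cast pvIdx_lt R L t hL)
  have hnat : (pvIdx R L t + R) % L = pvIdx R L (t + 1) := by
    show ((t * R) % L + R) % L = ((t + 1) * R) % L
    rw [Nat.mod_add_mod, Nat.succ_mul]
  rw [PySem.Int.mod_eq_emod_of_pos hL', Int.add_emod, hkk, h1]
  calc (((pvIdx R L t : Nat) : Int) + (R : Int)) % (L : Int) = (((pvIdx R L t + R : Nat)) : Int) % (L : Int) := by push_cast; ring_nf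
    _ = (((pvIdx R L t + R) % L : Nat) : Int) := by push_cast; ring
    _ = _ := by rw [hnat]

-- the index of any multiple jump: (j*k) % L = pvIdx j
theorem pvMul (k : Int) (L R j : Nat) (hL : 0 < L) (hR : R < L)
    (hk : PySem.Int.mod k (L : Int) = (R : Int)) :
    PySem.Int.mod ((j : Int) * k) (L : Int) = ((pvIdx R L j : Nat) : Int) := by
  have hL' : (0 : Int) < L := by exact_mod_cast hL
  have hkk : k % (L : Int) = (R : Int) := by rw [← PySem.Int.mod_eq_emod_of_pos hL']; exact hk
  have hRR : (R : Int) % (L : Int) = (R : Int) :=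
    Int.emod_eq_of_lt (by positivity) (by exact_mod_cast hR)
  rw [PySem.Int.mod_eq_emod_of_pos hL']
  calc ((j : Int) * k) % (L : Int) = ((j : Int) % L * (k % L)) % L := by rw [Int.mul_emod]
    _ = ((j : Int) * (R : Int)) % L := by
          rw [hkk]
          conv_rhs => rw [Int.mul_emod]
          rw [hRR]
    _ = (((j * R : Nat)) : Int) % L := by push_cast; ring_nf
    _ = (((j * R) % L : Nat) : Int) := by push_cast; ring
    _ = _ := rfl

-- before step m = L / gcd R L, the current index has never been visited
theorem pv_first_repeat (R L t j : Nat) (hL : 0 < L) (ht : t < L / Nat.gcd R L) (hj : j < t) :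
    pvIdx R L j ≠ pvIdx R L t := by
  intro heq
  have hmod : j * R ≡ t * R [MOD L] := by
    unfold Nat.ModEq
    exact heq
  have hdvd : L ∣ t * R - j * R := (Nat.modEq_iff_dvd' (Nat.mul_le_mul_right R hj.le)).mp hmod
  rw [← Nat.sub_mul] at hdvd
  have hm : (L / Nat.gcd R L) ∣ (t - j) := (pv_dvd_iff R L (t - j) hL).mp hdvd
  have := Nat.le_of_dvd (by omega) hm
  omega

-- at step m the walk is back at index 0
theorem pv_period (R L : Nat) (hL : 0 < L) : pvIdx R L (L / Nat.gcd R L) = 0 := by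
  have : L ∣ (L / Nat.gcd R L) * R := (pv_dvd_iff R L _ hL).mpr dvd_rfl
  obtain ⟨c, hc⟩ := this
  show ((L / Nat.gcd R L) * R) % L = 0
  rw [hc, Nat.mul_mod_right]

theorem pv_m_pos (R L : Nat) (hL : 0 < L) : 0 < L / Nat.gcd R L :=
  Nat.div_pos (Nat.le_of_dvd hL (Nat.gcd_dvd_right R L)) (Nat.gcd_pos_of_pos_right R hL)

-- A's loop, from state t, appends exactly the characters at pvIdx t, …, pvIdx (m-1)
theorem pvLoopA_inv (cs : List Char) (k : Int) (L R : Nat) (hL : 0 < L)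
    (hcs : cs.length = L) (hR : R < L)
    (hk : PySem.Int.mod k (L : Int) = (R : Int)) :
    ∀ d t, t ≤ L / Nat.gcd R L → L / Nat.gcd R L - t = d → ∀ acc,
      pvLoopA cs k (L : Int) (L + 1 - t) (pvVis R L t) ((pvIdx R L t : Nat) : Int) acc =
        acc ++ (List.range' t (L / Nat.gcd R L - t)).map (fun j => cs.getD (pvIdx R L j) ' ') := by
  intro d
  induction d with
  | zero =>
    intro t ht hd acc
    have hmle : L / Nat.gcd R L ≤ L := Nat.div_le_self _ _
    have htm : t = L / Nat.gcd R L := by omega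
    subst htm
    have hfuel : L + 1 - L / Nat.gcd R L = (L - L / Nat.gcd R L) + 1 := by omega
    rw [hfuel, pvLoopA]
    have hget : PySem.List.pyGet? (pvVis R L (L / Nat.gcd R L))
        ((pvIdx R L (L / Nat.gcd R L) : Nat) : Int) = some true := by
      rw [PySem.List.pyGet?_natCast, pvVis_get _ _ _ _ (pvIdx_lt R L _ hL)]
      have : ((List.range (L / Nat.gcd R L)).any
          fun j => pvIdx R L j == pvIdx R L (L / Nat.gcd R L)) = true := by
        rw [List.any_eq_true]
        refine ⟨0, List.mem_range.mpr (pv_m_pos R L hL), ?_⟩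
        simp [pvIdx_zero, pv_period R L hL]
      rw [this]
    simp [hget]
  | succ d ih =>
    intro t ht hd acc
    have hmle : L / Nat.gcd R L ≤ L := Nat.div_le_self _ _
    have htm : t < L / Nat.gcd R L := by omega
    have hfuel : L + 1 - t = (L - t) + 1 := by omega
    rw [hfuel, pvLoopA]
    have hidx : pvIdx R L t < cs.length := by rw [hcs]; exact pvIdx_lt R L t hL
    have hfalse : PySem.List.pyGet? (pvVis R L t) ((pvIdx R L t : Nat) : Int) = some false := by
      rw [PySem.List.pyGet?_natCast, pvVis_get _ _ _ _ (pvIdx_lt R L t hL)]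
      have : ((List.range t).any fun j => pvIdx R L j == pvIdx R L t) = false := by
        rw [List.any_eq_false]
        intro j hj
        simpa using pv_first_repeat R L t j hL htm (List.mem_range.mp hj)
      rw [this]
    have hchar : PySem.List.pyGet? cs ((pvIdx R L t : Nat) : Int) = some cs[pvIdx R L t] := by
      rw [PySem.List.pyGet?_natCast]
      exact List.getElem?_eq_getElem hidx
    rw [hfalse]
    simp only [hchar]
    rw [pvVis_set R L t hL, pvStep k L R t hL hR hk]
    have hfuel2 : L - t = L + 1 - (t + 1) := by omega
    rw [hfuel2, ih (t + 1) (by omega) (by omega) (acc ++ [cs[pvIdx R L t]])]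
    have hrange : List.range' t (L / Nat.gcd R L - t) =
        t :: List.range' (t + 1) (L / Nat.gcd R L - (t + 1)) := by
      have h5 : L / Nat.gcd R L - t = (L / Nat.gcd R L - (t + 1)) + 1 := by omega
      rw [h5, List.range'_succ]
    rw [hrange, List.map_cons]
    have hgetD : cs.getD (pvIdx R L t) ' ' = cs[pvIdx R L t] := List.getD_eq_getElem cs ' ' hidx
    rw [hgetD, List.append_assoc, List.singleton_append]

-- ===== VERDICT (by name: the statement is the Claim_ definition above) =====
theorem repeat_char_jump_spec : Claim_equal_repeat_char_jump := by
  intro s k _ hpre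
  unfold Pre_repeat_char_jump at hpre
  unfold Spec_repeat_char_jump repeat_char_jump repeat_char_jump_alt
  have hL : 0 < s.toList.length := List.length_pos_of_ne_nil hpre
  have hL' : (0 : Int) < (s.toList.length : Int) := by exact_mod_cast hL
  obtain ⟨R, hk⟩ : ∃ R : Nat, PySem.Int.mod k (s.toList.length : Int) = (R : Int) :=
    ⟨_, (Int.toNat_of_nonneg (PySem.Int.mod_nonneg (a := k) hL')).symm⟩
  have hR : R < s.toList.length := by
    have h2 := PySem.Int.mod_lt (a := k) hL'
    rw [hk] at h2
    exact_mod_cast h2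
  simp only [PySem.Str.len_eq]
  rw [hk, pvGcdLoop_eq R s.toList.length, PySem.Int.floordiv_natCast,
    PySem.List.pyRange_zero_natCast, List.map_map]
  have hvis0 : List.replicate s.toList.length false = pvVis R s.toList.length 0 := by
    simp [pvVis]
  have h00 : (0 : Int) = ((pvIdx R s.toList.length 0 : Nat) : Int) := by simp [pvIdx]
  have hfuel : s.toList.length + 1 = s.toList.length + 1 - 0 := rfl
  rw [hvis0, h00, hfuel,
    pvLoopA_inv s.toList k s.toList.length R hL rfl hR hk
      (s.toList.length / Nat.gcd R s.toList.length) 0 (Nat.zero_le _) rfl []]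
  simp only [Nat.sub_zero, List.nil_append]
  congr 1
  rw [← List.range_eq_range']
  apply List.map_congr_left
  intro j _
  rw [Function.comp_apply, pvMul k s.toList.length R j hL hR hk, PySem.List.pyGetD_natCast]
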